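-- pv_equiv track=rewrite | github.com/jonasnick/purify | purify.py | key_to_bits
-- ===== SOURCE A (Python) =====
-- def key_to_bits(n, bits):
--     """Convert the scalar n to a list of bits that encode it for use in the circuit."""
--     n -= 1
--     if n >= (1 << bits):
--         raise RuntimeError("Key out of range")
--     ret = [(n >> i) & 1 for i in range(bits)]
--     for i in range(3, bits, 3):
--         if not ret[i]:
--             ret[i - 1] = 1 - ret[i - 1]
--             ret[i - 2] = 1 - ret[i - 2]
--         ret[i] = 1 - ret[i]
--     return ret
-- ===== SOURCE B (Python) =====
-- def key_to_bits(n, bits):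
--     """Convert the scalar n to a list of bits that encode it for use in the circuit."""
--     n -= 1
--     if n >= (1 << bits):
--         raise RuntimeError("Key out of range")
--
--     def bit(i):
--         b = (n >> i) & 1
--         if i % 3 == 0:
--             # top position of a triple: always complemented (except index 0)
--             return 1 - b if i >= 3 else b
--         # lower position of a triple whose top is t: complemented iff the
--         # top lies inside the list and its raw bit is 0
--         t = i - i % 3 + 3
--         if t < bits and not (n >> t) & 1:
--             return 1 - b
--         return b
--
--     return [bit(i) for i in range(bits)]
-- ===== Notes on version B (the rewrite author's own statement) =====
-- stated objective: alternative
-- what changed: Replaces the build-then-mutate scheme (raw bit list, second loop flipping triples in place) with a direct per-index closed-form formula: each output bit is computed independently from n and its position (top-of-triple bits are complemented; lower triple bits are complemented iff their triple's in-range top raw bit is 0), so there is no mutation and no stride-3 walk.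
import Mathlib
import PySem

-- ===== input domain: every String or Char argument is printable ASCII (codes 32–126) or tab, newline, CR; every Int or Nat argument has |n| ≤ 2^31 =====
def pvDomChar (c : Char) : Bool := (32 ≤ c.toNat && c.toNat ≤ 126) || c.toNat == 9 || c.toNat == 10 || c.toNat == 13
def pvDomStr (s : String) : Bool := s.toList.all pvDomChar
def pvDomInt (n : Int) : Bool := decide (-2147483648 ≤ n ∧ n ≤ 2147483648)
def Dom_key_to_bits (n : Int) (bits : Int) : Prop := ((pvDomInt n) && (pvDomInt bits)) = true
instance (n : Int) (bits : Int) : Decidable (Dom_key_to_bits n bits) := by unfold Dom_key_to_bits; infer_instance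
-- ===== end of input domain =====

-- B computes each output bit by a direct per-index formula instead of A's build-then-mutate scheme.

-- ===== PORT A =====
-- literal port of A: raw bit list by comprehension, then the flipping loop over range(3, bits, 3).
-- Python's n >> i is Int.shiftRight n i.toNat (the shift amounts here are always ≥ 0, so .toNat is
-- exact), and Python's '& 1' is '% 2' (Int.emod is non-negative for modulus 2, exactly Python's '& 1').
-- the body of A's for-loop (mutating ret at i, i-1, i-2), as a named fold step:
def keyToBitsStep (ret : List Int) (i : Int) : List Int :=
  let ret :=
    if PySem.List.pyGetD ret i 0 = 0 then
      PySem.List.pySetD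
        (PySem.List.pySetD ret (i - 1) (1 - PySem.List.pyGetD ret (i - 1) 0))
        (i - 2) (1 - PySem.List.pyGetD ret (i - 2) 0)
    else ret
  PySem.List.pySetD ret i (1 - PySem.List.pyGetD ret i 0)

def key_to_bits (n : Int) (bits : Int) : List Int :=
  let m := n - 1
  -- 'if n >= (1 << bits): raise RuntimeError' (and ValueError for bits < 0) is excluded by Pre_
  let ret := (PySem.List.pyRange 0 bits 1).map (fun i => Int.shiftRight m i.toNat % 2)
  (PySem.List.pyRange 3 bits 3).foldl keyToBitsStep ret

-- ===== PORT B =====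
-- the inner helper 'bit(i)' of Source B (m = n - 1 after the decrement)
def altBit (m : Int) (bits : Int) (i : Int) : Int :=
  let b := Int.shiftRight m i.toNat % 2
  if i % 3 = 0 then
    if 3 ≤ i then 1 - b else b
  else
    let t := i - i % 3 + 3
    if t < bits ∧ Int.shiftRight m t.toNat % 2 = 0 then 1 - b else b

def key_to_bits_alt (n : Int) (bits : Int) : List Int :=
  let m := n - 1
  (PySem.List.pyRange 0 bits 1).map (altBit m bits)

-- ===== PRECONDITION & SPEC =====
-- Pre_ excludes exactly the inputs where A raises: bits < 0 (ValueError from 1 << bits)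
-- and n - 1 ≥ 2^bits (the explicit RuntimeError).
def Pre_key_to_bits (n : Int) (bits : Int) : Prop := 0 ≤ bits ∧ n - 1 < 2 ^ bits.toNat
instance (n : Int) (bits : Int) : Decidable (Pre_key_to_bits n bits) := by unfold Pre_key_to_bits; infer_instance
def pvWitness_key_to_bits : Int × Int := (5, 4)

def Spec_key_to_bits (n : Int) (bits : Int) (out : List Int) : Prop := out = key_to_bits_alt n bits
instance (n : Int) (bits : Int) (out : List Int) : Decidable (Spec_key_to_bits n bits out) := by unfold Spec_key_to_bits; infer_instance

-- ===== CLAIM (what is proved, stated in full; the proofs are below) =====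
def Claim_equal_key_to_bits : Prop := ∀ (n : Int) (bits : Int), Dom_key_to_bits n bits → Pre_key_to_bits n bits → Spec_key_to_bits n bits (key_to_bits n bits)

-- ===== LEMMAS AND PROOFS =====

-- range(a, b, 3) unfolding lemmas
theorem pyRange3_nil (a b : Int) (h : b ≤ a) : PySem.List.pyRange a b 3 = [] := by
  rw [PySem.List.pyRange_of_pos a b (by norm_num), if_neg (by omega)]
  simp

theorem pyRange3_cons (a b : Int) (h : a < b) :
    PySem.List.pyRange a b 3 = a :: PySem.List.pyRange (a + 3) b 3 := by
  rw [PySem.List.pyRange_of_pos a b (by norm_num),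
      PySem.List.pyRange_of_pos (a + 3) b (by norm_num)]
  have hm : (if a < b then ((b - a + 3 - 1) / 3).toNat else 0)
      = (if a + 3 < b then ((b - (a + 3) + 3 - 1) / 3).toNat else 0) + 1 := by
    split_ifs <;> omega
  rw [hm, List.range_succ_eq_map]
  simp only [List.map_cons, List.map_map]
  congr 1
  · push_cast; ring
  · apply List.map_congr_left
    intro k _
    simp only [Function.comp_apply]
    push_cast
    ring

-- get/set at offsets 0,1,2 past a prefix
theorem getD_mid1 (pre post : List Int) (a b c d : Int) :
    PySem.List.pyGetD (pre ++ a :: b :: c :: post) ((pre.length : Int) + 1) d = b := by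
  rw [show ((pre.length : Int) + 1) = ((pre.length + 1 : Nat) : Int) by push_cast; ring,
      PySem.List.pyGetD_natCast]
  rw [List.getD_eq_getElem?_getD, List.getElem?_append_right (by omega)]
  simp

theorem getD_mid2 (pre post : List Int) (a b c d : Int) :
    PySem.List.pyGetD (pre ++ a :: b :: c :: post) ((pre.length : Int) + 2) d = c := by
  rw [show ((pre.length : Int) + 2) = ((pre.length + 2 : Nat) : Int) by push_cast; ring,
      PySem.List.pyGetD_natCast]
  rw [List.getD_eq_getElem?_getD, List.getElem?_append_right (by omega)]
  simp

theorem setD_mid1 (pre post : List Int) (a b c v : Int) :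
    PySem.List.pySetD (pre ++ a :: b :: c :: post) ((pre.length : Int) + 1) v = pre ++ a :: v :: c :: post := by
  rw [show ((pre.length : Int) + 1) = ((pre.length + 1 : Nat) : Int) by push_cast; ring,
      PySem.List.pySetD_natCast]
  rw [List.set_append_right _ _ (by omega)]
  simp

theorem setD_mid2 (pre post : List Int) (a b c v : Int) :
    PySem.List.pySetD (pre ++ a :: b :: c :: post) ((pre.length : Int) + 2) v = pre ++ a :: b :: v :: post := by
  rw [show ((pre.length : Int) + 2) = ((pre.length + 2 : Nat) : Int) by push_cast; ring,
      PySem.List.pySetD_natCast]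
  rw [List.set_append_right _ _ (by omega)]
  simp

-- one pass of A's loop body on a list decomposed around the triple it touches
theorem stepA_eq (acc tail : List Int) (i r2 r1 r0 : Int)
    (hlen : (acc.length : Int) = i - 2) (hr0 : r0 = 0 ∨ r0 = 1) :
    keyToBitsStep (acc ++ r2 :: r1 :: r0 :: tail) i
      = acc ++ (if r0 ≠ 0 then r2 :: r1 :: 0 :: tail else (1 - r2) :: (1 - r1) :: 1 :: tail) := by
  have hi : i = (acc.length : Int) + 2 := by omega
  subst hi
  simp only [keyToBitsStep]
  rw [show (acc.length : Int) + 2 - 1 = (acc.length : Int) + 1 by ring,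
      show (acc.length : Int) + 2 - 2 = (acc.length : Int) by ring]
  rcases hr0 with h | h <;> subst h <;>
    simp [getD_mid1, getD_mid2, setD_mid1, setD_mid2]

-- raw bit, as A's comprehension computes it
def rawBit (m : Int) (i : Int) : Int := Int.shiftRight m i.toNat % 2

-- altBit at the three positions of a triple whose top i is in range
theorem altBit_top (m bits i : Int) (h3 : 3 ≤ i) (him : i % 3 = 0) (hib : i < bits) :
    altBit m bits i = 1 - rawBit m i := by
  simp [altBit, rawBit, him, h3]

theorem altBit_low1 (m bits i : Int) (h3 : 3 ≤ i) (him : i % 3 = 0) (hib : i < bits) :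
    altBit m bits (i - 1)
      = if rawBit m i ≠ 0 then rawBit m (i - 1) else 1 - rawBit m (i - 1) := by
  have h1 : (i - 1) % 3 = 2 := by omega
  simp only [altBit, rawBit, h1]
  rw [show i - 1 - 2 + 3 = i by ring]
  have : ¬ ((2:Int) = 0) := by norm_num
  rw [if_neg this]
  by_cases h0 : Int.shiftRight m i.toNat % 2 = 0
  · rw [if_pos ⟨hib, h0⟩, if_neg (by simp [h0])]
  · rw [if_neg (by tauto), if_pos (by simpa using h0)]

theorem altBit_low2 (m bits i : Int) (h3 : 3 ≤ i) (him : i % 3 = 0) (hib : i < bits) :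
    altBit m bits (i - 2)
      = if rawBit m i ≠ 0 then rawBit m (i - 2) else 1 - rawBit m (i - 2) := by
  have h1 : (i - 2) % 3 = 1 := by omega
  simp only [altBit, rawBit, h1]
  rw [show i - 2 - 1 + 3 = i by ring]
  have : ¬ ((1:Int) = 0) := by norm_num
  rw [if_neg this]
  by_cases h0 : Int.shiftRight m i.toNat % 2 = 0
  · rw [if_pos ⟨hib, h0⟩, if_neg (by simp [h0])]
  · rw [if_neg (by tauto), if_pos (by simpa using h0)]

-- past the last full triple (i ≥ bits, i ≡ 0 mod 3), altBit is the raw bit on [i-2, bits)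
theorem altBit_trailing (m bits i j : Int) (h3 : 3 ≤ i) (him : i % 3 = 0)
    (hbi : bits ≤ i) (hj1 : i - 2 ≤ j) (hj2 : j < bits) :
    altBit m bits j = rawBit m j := by
  have hjm : j % 3 ≠ 0 := by omega
  have ht : j - j % 3 + 3 = i := by omega
  simp only [altBit, rawBit, ht]
  rw [if_neg hjm, if_neg (by rintro ⟨h, _⟩; omega)]

-- the invariant: A's remaining fold on (finished prefix ++ raw tail) equals the altBit map
theorem loop_eq (m bits i : Int) (acc : List Int)
    (h3 : 3 ≤ i) (him : i % 3 = 0) (hlen : (acc.length : Int) = i - 2) :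
    (PySem.List.pyRange i bits 3).foldl keyToBitsStep
        (acc ++ (PySem.List.pyRange (i - 2) bits 1).map (rawBit m))
      = acc ++ (PySem.List.pyRange (i - 2) bits 1).map (altBit m bits) := by
  by_cases h : i < bits
  · have t : ∀ (f : Int → Int), (PySem.List.pyRange (i - 2) bits 1).map f
        = f (i - 2) :: f (i - 1) :: f i :: (PySem.List.pyRange (i + 1) bits 1).map f := by
      intro f
      rw [PySem.List.pyRange_one_cons (show i - 2 < bits by omega),
          show i - 2 + 1 = i - 1 by ring,
          PySem.List.pyRange_one_cons (show i - 1 < bits by omega),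
          show i - 1 + 1 = i by ring,
          PySem.List.pyRange_one_cons h]
      simp
    rw [pyRange3_cons i bits h, List.foldl_cons, t (rawBit m), t (altBit m bits)]
    have hr0 := Int.emod_two_eq (Int.shiftRight m i.toNat)
    rw [stepA_eq acc _ i (rawBit m (i - 2)) (rawBit m (i - 1)) (rawBit m i) hlen
          (by simpa [rawBit] using by omega)]
    rw [altBit_top m bits i h3 him h, altBit_low1 m bits i h3 him h, altBit_low2 m bits i h3 him h]
    by_cases hz : rawBit m i ≠ 0
    · rw [if_pos hz, if_pos hz, if_pos hz]
      have hrec := loop_eq m bits (i + 3)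
          (acc ++ [rawBit m (i - 2), rawBit m (i - 1), (0 : Int)])
          (by omega) (by omega) (by simp; omega)
      rw [show i + 3 - 2 = i + 1 by ring] at hrec
      have h1 : rawBit m i = 1 := by simp only [rawBit] at hz ⊢; omega
      simpa [h1] using hrec
    · rw [if_neg hz, if_neg hz, if_neg hz]
      have hrec := loop_eq m bits (i + 3)
          (acc ++ [1 - rawBit m (i - 2), 1 - rawBit m (i - 1), (1 : Int)])
          (by omega) (by omega) (by simp; omega)
      rw [show i + 3 - 2 = i + 1 by ring] at hrec
      have h1 : 1 - rawBit m i = 1 := by simp only [rawBit] at hz ⊢; omega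
      simpa [h1] using hrec
  · rw [pyRange3_nil i bits (by omega), List.foldl_nil]
    congr 1
    apply List.map_congr_left
    intro j hj
    rw [PySem.List.mem_pyRange_one] at hj
    exact (altBit_trailing m bits i j h3 him (by omega) hj.1 hj.2).symm
termination_by (bits - i).toNat
decreasing_by all_goals omega

theorem key_to_bits_main (n bits : Int) : key_to_bits n bits = key_to_bits_alt n bits := by
  simp only [key_to_bits, key_to_bits_alt]
  by_cases hb : bits ≤ 0
  · rw [PySem.List.pyRange_one_eq_nil (by omega), pyRange3_nil _ _ (by omega)]
    simp
  · rw [PySem.List.pyRange_one_cons (show (0:Int) < bits by omega)]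
    simp only [List.map_cons]
    have hrec := loop_eq (n - 1) bits 3 [rawBit (n - 1) 0] (by norm_num) (by norm_num) (by simp)
    rw [show (3:Int) - 2 = 1 by ring] at hrec
    rw [show ((0:Int) + 1) = 1 by ring]
    have h0 : altBit (n - 1) bits 0 = rawBit (n - 1) 0 := by
      simp [altBit, rawBit]
    simp only [rawBit] at hrec h0
    rw [← h0]
    simpa using hrec

-- ===== VERDICT (by name: the statement is the Claim_ definition above) =====
theorem key_to_bits_spec : Claim_equal_key_to_bits := by
  intro n bits _ _
  exact key_to_bits_main n bits
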